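-- pv_equiv track=rewrite | github.com/saicharanbhogi2001/leetcode_python | Q747. Largest Number At Least Twice of Others.py | dominantIndex
-- ===== SOURCE A (Python) =====
-- from typing import List
--
-- def dominantIndex(nums: List[int]) -> int:
--     m=max(nums)
--     s=nums.index(m)
--     c=0
--     for i in range(len(nums)):
--         if s!=i and (nums[i]*2)>m:
--             return -1
--     return s
-- ===== SOURCE B (Python) =====
-- def dominantIndex(nums):
--     best = nums[0]
--     bi = 0
--     second = None
--     for i, v in enumerate(nums[1:], 1):
--         if v > best:
--             second = best
--             best = v
--             bi = i
--         elif second is None or v > second: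
--             second = v
--     return bi if second is None or best >= 2 * second else -1
-- ===== Notes on version B (the rewrite author's own statement) =====
-- stated objective: alternative
-- what changed: Replaces max() + .index() + a full scan comparing every element against the max with a single pass that tracks the largest value, its first index, and the second-largest value, deciding by largest >= 2*second.
-- outside the precondition, e.g. on dominantIndex([]): A raises ValueError, B raises IndexError
import Mathlib
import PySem

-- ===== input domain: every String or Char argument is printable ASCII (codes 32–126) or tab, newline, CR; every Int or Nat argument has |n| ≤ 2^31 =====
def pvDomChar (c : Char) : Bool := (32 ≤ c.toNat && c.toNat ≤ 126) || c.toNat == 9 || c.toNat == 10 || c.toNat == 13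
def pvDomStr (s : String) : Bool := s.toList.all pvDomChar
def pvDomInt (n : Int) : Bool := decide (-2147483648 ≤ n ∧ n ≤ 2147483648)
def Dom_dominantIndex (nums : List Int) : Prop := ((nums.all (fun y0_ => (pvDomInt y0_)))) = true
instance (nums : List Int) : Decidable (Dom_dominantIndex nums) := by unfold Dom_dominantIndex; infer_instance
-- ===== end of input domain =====

-- B is an alternative single-pass algorithm: instead of A's max() + .index() + full scan
-- against the max, it tracks the largest value, its first index, and the second-largest value.


-- ===== PORT A =====
-- for i in range(len(nums)): if s != i and nums[i]*2 > m: return -1 ; after the loop: return s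
def aLoop (nums : List Int) (m s : Int) : List Int → Int
  | [] => s
  | i :: rest =>
      if s ≠ i ∧ PySem.List.pyGetD nums i 0 * 2 > m then -1 else aLoop nums m s rest

def dominantIndex (nums : List Int) : Int :=
  match PySem.List.max? nums (fun x => x) with
  | none => 0  -- unreachable: Python's max([]) raises ValueError, excluded by Pre_
  | some m =>
      let s : Int := (((PySem.List.index? nums m).getD 0 : Nat) : Int)
      aLoop nums m s (PySem.List.pyRange 0 nums.length 1)

-- ===== PORT B =====
-- for i, v in enumerate(nums[1:], 1): update (best, bi, second)
def altLoop (best bi : Int) (second : Option Int) : List (Int × Int) → Int × Int × Option Int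
  | [] => (best, bi, second)
  | (i, v) :: rest =>
      if v > best then altLoop v i (some best) rest
      else if (match second with | none => true | some s2 => decide (v > s2)) then
        altLoop best bi (some v) rest
      else altLoop best bi second rest

def dominantIndex_alt (nums : List Int) : Int :=
  match nums with
  | [] => 0  -- unreachable: nums[0] raises IndexError, excluded by Pre_
  | x :: rest =>
      let r := altLoop x 0 none (PySem.List.enumerate rest 1)
      match r.2.2 with
      | none => r.2.1
      | some s2 => if r.1 ≥ 2 * s2 then r.2.1 else -1

-- ===== PRECONDITION & SPEC =====
-- Pre_ excludes only the empty list, where Python's max([]) raises ValueError.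
def Pre_dominantIndex (nums : List Int) : Prop := nums ≠ []
instance (nums : List Int) : Decidable (Pre_dominantIndex nums) := by unfold Pre_dominantIndex; infer_instance
def pvWitness_dominantIndex : List Int := [3, 6, 1, 0]

def Spec_dominantIndex (nums : List Int) (out : Int) : Prop := out = dominantIndex_alt nums
instance (nums : List Int) (out : Int) : Decidable (Spec_dominantIndex nums out) := by unfold Spec_dominantIndex; infer_instance

-- ===== CLAIM (what is proved, stated in full; the proofs are below) =====
def Claim_equal_dominantIndex : Prop := ∀ (nums : List Int), Dom_dominantIndex nums → Pre_dominantIndex nums → Spec_dominantIndex nums (dominantIndex nums)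

-- ===== LEMMAS AND PROOFS =====

-- A's loop returns -1 exactly when some other index holds more than half the max
theorem aLoop_eq (nums : List Int) (m s : Int) (l : List Int) :
    aLoop nums m s l =
      if ∃ i ∈ l, s ≠ i ∧ PySem.List.pyGetD nums i 0 * 2 > m then -1 else s := by
  induction l with
  | nil => simp [aLoop]
  | cons i rest ih =>
      simp only [aLoop, ih]
      by_cases h : s ≠ i ∧ PySem.List.pyGetD nums i 0 * 2 > m
      · simp [h]
      · simp only [if_neg h]
        apply if_congr _ rfl rfl
        constructor
        · rintro ⟨j, hj, hp⟩; exact ⟨j, List.mem_cons_of_mem _ hj, hp⟩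
        · rintro ⟨j, hj, hp⟩
          rcases List.mem_cons.mp hj with rfl | hj'
          · exact absurd hp h
          · exact ⟨j, hj', hp⟩

-- invariant carried by B's single pass: best is the max of the elements seen so far,
-- bi its first index, second the max of the seen elements with one copy of best removed
def BInv (seen : List Int) (st : Int × Int × Option Int) : Prop :=
  st.1 ∈ seen ∧ (∀ v ∈ seen, v ≤ st.1) ∧
  (∃ k : Nat, st.2.1 = (k : Int) ∧ PySem.List.index? seen st.1 = some k) ∧
  st.2.2 = PySem.List.max? (seen.erase st.1) (fun x => x)

theorem max?_of_isMax (seen : List Int) (b : Int) (hb : b ∈ seen) (hmax : ∀ v ∈ seen, v ≤ b) :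
    PySem.List.max? seen (fun x => x) = some b := by
  cases seen with
  | nil => simp at hb
  | cons y t =>
      rw [PySem.List.max?_id_cons]
      have h1 : t.foldl max y = y ∨ t.foldl max y ∈ t := PySem.List.foldl_max_mem t y
      have h2 := PySem.List.le_foldl_max t y
      have hle : t.foldl max y ≤ b := by
        rcases h1 with h | h
        · rw [h]; exact hmax y (by simp)
        · exact hmax _ (by simp [h])
      have hge : b ≤ t.foldl max y := by
        rcases List.mem_cons.mp hb with rfl | h
        · exact h2.1
        · exact h2.2 b h
      simp [le_antisymm hle hge]

theorem max?_append_singleton (E : List Int) (v : Int) :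
    PySem.List.max? (E ++ [v]) (fun x => x) =
      some (match PySem.List.max? E (fun x => x) with | none => v | some s2 => max s2 v) := by
  cases E with
  | nil =>
      have h0 : PySem.List.max? ([] : List Int) (fun x => x) = none := by
        rw [PySem.List.max?_eq_none_iff]
      rw [List.nil_append, PySem.List.max?_id_cons, h0]
      simp
  | cons e t =>
      rw [List.cons_append, PySem.List.max?_id_cons, PySem.List.max?_id_cons]
      simp [List.foldl_append]

theorem altLoop_inv (rest : List Int) :
    ∀ (seen : List Int) (best bi : Int) (second : Option Int),
      BInv seen (best, bi, second) →
      BInv (seen ++ rest) (altLoop best bi second (PySem.List.enumerate rest (seen.length : Int))) := by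
  induction rest with
  | nil => intro seen best bi second h; simpa [altLoop, PySem.List.enumerate_nil] using h
  | cons v rest' ih =>
      intro seen best bi second h
      obtain ⟨hmem, hmax, ⟨k, hbi, hidx⟩, hsec⟩ := h
      rw [PySem.List.enumerate_cons]
      have hseen : seen ++ v :: rest' = (seen ++ [v]) ++ rest' := by simp
      have hlen : (seen.length : Int) + 1 = ((seen ++ [v]).length : Int) := by simp
      by_cases hv : v > best
      · -- v is a new strict maximum: best := v, bi := current index, second := old best
        simp only [altLoop, if_pos hv]
        rw [hseen, hlen]
        apply ih
        have hnotin : v ∉ seen := fun hin => absurd (hmax v hin) (by omega)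
        refine ⟨by simp, ?_, ⟨seen.length, rfl, ?_⟩, ?_⟩
        · intro w hw
          rcases List.mem_append.mp hw with hw | hw
          · exact le_of_lt (lt_of_le_of_lt (hmax w hw) hv)
          · simp at hw; omega
        · exact PySem.List.index?_append_singleton_self seen v hnotin
        · rw [List.erase_append_right _ hnotin]
          simp only [List.erase_cons_head, List.append_nil]
          exact (max?_of_isMax seen best hmem hmax).symm
      · -- v ≤ best: best and bi unchanged, second possibly updated
        have hvle : v ≤ best := by omega
        have hinv2 : ∀ (second' : Option Int),
            second' = PySem.List.max? (seen.erase best ++ [v]) (fun x => x) →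
            BInv ((seen ++ [v]) ++ rest')
              (altLoop best bi second' (PySem.List.enumerate rest' ((seen ++ [v]).length : Int))) := by
          intro second' hsec'
          apply ih
          refine ⟨by simp [hmem], ?_, ⟨k, hbi, ?_⟩, ?_⟩
          · intro w hw
            rcases List.mem_append.mp hw with hw | hw
            · exact hmax w hw
            · simp at hw; omega
          · rw [PySem.List.index?_append_of_mem _ hmem]; exact hidx
          · rw [List.erase_append_left _ hmem]; exact hsec'
        have hm := max?_append_singleton (seen.erase best) v
        simp only [altLoop, if_neg hv]
        cases hsc : second with
        | none =>
            rw [hsc] at hsec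
            rw [← hsec] at hm
            simp only at hm
            rw [hseen, hlen]
            exact hinv2 (some v) hm.symm
        | some s2 =>
            rw [hsc] at hsec
            rw [← hsec] at hm
            simp only at hm
            rw [hseen, hlen]
            by_cases hv2 : v > s2
            · rw [if_pos (decide_eq_true hv2)]
              have : max s2 v = v := by omega
              rw [this] at hm
              exact hinv2 (some v) hm.symm
            · rw [if_neg (by simpa using hv2 : ¬ (decide (v > s2) = true))]
              have : max s2 v = s2 := by omega
              rw [this] at hm
              exact hinv2 (some s2) hm.symm

theorem getElem_ne_mid (pre suf : List Int) (B : Int) (j : Nat)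
    (hj : j < (pre ++ B :: suf).length) (hne : j ≠ pre.length) :
    (pre ++ B :: suf)[j] ∈ pre ++ suf := by
  by_cases hlt : j < pre.length
  · rw [List.getElem_append_left hlt]
    exact List.mem_append.mpr (Or.inl (List.getElem_mem _))
  · have hgt : pre.length < j := by omega
    rw [List.getElem_append_right (by omega)]
    obtain ⟨d, hd⟩ : ∃ d, j - pre.length = d + 1 := ⟨j - pre.length - 1, by omega⟩
    simp only [hd, List.getElem_cons_succ]
    exact List.mem_append.mpr (Or.inr (List.getElem_mem _))

-- A's scan over all indices other than the first max index sees exactly the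
-- elements of the list with that one occurrence of the max removed
theorem bridge (pre suf : List Int) (B : Int) (P : Int → Prop) :
    B ∉ pre →
    ((∃ i ∈ PySem.List.pyRange 0 ((pre ++ B :: suf).length : Int) 1,
        (pre.length : Int) ≠ i ∧ P (PySem.List.pyGetD (pre ++ B :: suf) i 0)) ↔
      ∃ w ∈ pre ++ suf, P w) := by
  intro hB
  constructor
  · rintro ⟨i, hi, hne, hp⟩
    rw [PySem.List.mem_pyRange_one] at hi
    obtain ⟨h0, h1⟩ := hi
    rw [PySem.List.pyGetD_eq_getElem _ _ h0 h1] at hp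
    refine ⟨_, getElem_ne_mid pre suf B i.toNat (by omega) (by omega), hp⟩
  · rintro ⟨w, hw, hp⟩
    rcases List.mem_append.mp hw with hw | hw
    · obtain ⟨j, hj, rfl⟩ := List.mem_iff_getElem.mp hw
      refine ⟨(j : Int), ?_, by omega, ?_⟩
      · rw [PySem.List.mem_pyRange_one]
        refine ⟨by omega, by simp; omega⟩
      · rw [PySem.List.pyGetD_eq_getElem _ _ (by omega) (by simp; omega)]
        simpa [List.getElem_append_left (by simpa using hj)] using hp
    · obtain ⟨j, hj, rfl⟩ := List.mem_iff_getElem.mp hw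
      refine ⟨((pre.length + 1 + j : Nat) : Int), ?_, by omega, ?_⟩
      · rw [PySem.List.mem_pyRange_one]
        refine ⟨by omega, by simp; omega⟩
      · rw [PySem.List.pyGetD_eq_getElem _ _ (by omega) (by simp; omega)]
        simp only [Int.toNat_natCast]
        rw [List.getElem_append_right (by omega)]
        have h1 : pre.length + 1 + j - pre.length = j + 1 := by omega
        simp only [h1, List.getElem_cons_succ]
        exact hp

-- ===== VERDICT (by name: the statement is the Claim_ definition above) =====
theorem dominantIndex_spec : Claim_equal_dominantIndex := by
  intro nums _ hpre
  unfold Spec_dominantIndex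
  cases nums with
  | nil => exact absurd rfl hpre
  | cons x rest =>
      have hinv0 : BInv [x] (x, 0, none) := by
        refine ⟨by simp, by simp, ⟨0, rfl, PySem.List.index?_cons_self x []⟩, ?_⟩
        simp only [List.erase_cons_head]
        exact ((PySem.List.max?_eq_none_iff _ _).mpr rfl).symm
      have hinv := altLoop_inv rest [x] x 0 none hinv0
      simp only [List.length_singleton, Nat.cast_one, List.singleton_append] at hinv
      rcases hst : altLoop x 0 none (PySem.List.enumerate rest 1) with ⟨B, BI, S⟩
      rw [hst] at hinv
      obtain ⟨hmem, hmax, ⟨k, hBI, hidx⟩, hS⟩ := hinv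
      simp only at hmem hmax hBI hidx hS
      obtain ⟨pre, suf, hconcat, hk, hBpre⟩ := (PySem.List.index?_eq_some_iff _ _ _).mp hidx
      have herase : (x :: rest).erase B = pre ++ suf := by
        rw [hconcat, List.erase_append_right _ hBpre, List.erase_cons_head]
      have hA : dominantIndex (x :: rest) =
          (if ∃ i ∈ PySem.List.pyRange 0 ((x :: rest).length : Int) 1,
              (k : Int) ≠ i ∧ PySem.List.pyGetD (x :: rest) i 0 * 2 > B then -1 else (k : Int)) := by
        rw [dominantIndex, max?_of_isMax _ B hmem hmax]
        simp only [hidx, Option.getD_some]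
        rw [aLoop_eq]
      have hBalt : dominantIndex_alt (x :: rest) =
          S.elim BI (fun s2 => if B ≥ 2 * s2 then BI else -1) := by
        rw [dominantIndex_alt, hst]
        cases S <;> rfl
      have hbridge : (∃ i ∈ PySem.List.pyRange 0 ((x :: rest).length : Int) 1,
            (k : Int) ≠ i ∧ PySem.List.pyGetD (x :: rest) i 0 * 2 > B) ↔
          ∃ w ∈ pre ++ suf, w * 2 > B := by
        have h := bridge pre suf B (fun w => w * 2 > B) hBpre
        rw [← hconcat, hk] at h
        exact h
      rw [hA, hBalt]
      cases S with
      | none =>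
          simp only [Option.elim]
          have hnil : (x :: rest).erase B = [] := by
            have h := hS.symm
            rwa [PySem.List.max?_eq_none_iff] at h
          rw [if_neg (by
            rw [hbridge, ← herase, hnil]
            rintro ⟨w, hw, -⟩
            simp at hw)]
          exact hBI.symm
      | some s2 =>
          simp only [Option.elim]
          have hs2max : ∀ y ∈ (x :: rest).erase B, y ≤ s2 :=
            PySem.List.max?_isMax hS.symm
          have hs2mem : s2 ∈ (x :: rest).erase B := PySem.List.max?_mem hS.symm
          by_cases hdom : B ≥ 2 * s2
          · rw [if_pos hdom, if_neg (by
              rw [hbridge, ← herase]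
              rintro ⟨w, hw, hgt⟩
              have := hs2max w hw
              omega)]
            exact hBI.symm
          · rw [if_neg hdom, if_pos (by
              rw [hbridge, ← herase]
              exact ⟨s2, hs2mem, by omega⟩)]
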